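-- pv_equiv track=rewrite | github.com/elite3312/leet_code_practice | solutions/other/small_w_coding_test/smallwp1.py | number_of_unchanged_char_after_reverse
-- ===== SOURCE A (Python) =====
-- def number_of_unchanged_char_after_reverse(s):
--     res = 0
--     n = len(s)
--     if n == 0:
--         return 0
--     if n == 1:
--         return 1
--     j = n-1
--     for i in range(n//2):
--         if s[i] == s[j]:
--             res += 1
--         j -= 1
--     if n % 2 == 0:
--         res *= 2
--     else:
--         res = res*2+1
--     return res
-- ===== SOURCE B (Python) =====
-- def number_of_unchanged_char_after_reverse(s):
--     n = len(s)
--     return sum(1 for i in range(n) if s[i] == s[n - 1 - i])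
-- ===== Notes on version B (the rewrite author's own statement) =====
-- stated objective: simpler
-- what changed: B replaces A's half-length loop with a decremented mirror pointer, the res*2 / res*2+1 doubling branch and the separate n==0/n==1 guards by one direct full-range count of positions whose character equals its mirror image.
import Mathlib
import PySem

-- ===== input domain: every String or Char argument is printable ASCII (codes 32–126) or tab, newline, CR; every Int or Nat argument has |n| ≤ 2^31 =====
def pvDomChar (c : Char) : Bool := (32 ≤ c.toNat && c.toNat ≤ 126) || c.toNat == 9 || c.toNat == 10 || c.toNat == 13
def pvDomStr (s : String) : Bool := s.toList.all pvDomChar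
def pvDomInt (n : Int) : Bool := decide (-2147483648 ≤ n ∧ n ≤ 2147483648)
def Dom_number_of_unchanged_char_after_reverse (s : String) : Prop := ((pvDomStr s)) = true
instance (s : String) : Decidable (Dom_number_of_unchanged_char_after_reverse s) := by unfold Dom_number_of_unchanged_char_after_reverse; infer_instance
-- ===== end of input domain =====

-- B is a single direct full-range count of mirror-equal positions; A's half-loop with a
-- decremented pointer, the res*2 / res*2+1 branch and the n==0/n==1 guards disappear.

-- ===== PORT A =====
def number_of_unchanged_char_after_reverse (s : String) : Int :=
  let n : Int := PySem.Str.len s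
  if n = 0 then 0
  else if n = 1 then 1
  else
    let st := (PySem.List.pyRange 0 (PySem.Int.floordiv n 2) 1).foldl
      (fun (st : Int × Int) i =>
        ((if PySem.Str.pyGet? s i == PySem.Str.pyGet? s st.2 then st.1 + 1 else st.1), st.2 - 1))
      (0, n - 1)
    if PySem.Int.mod n 2 = 0 then st.1 * 2 else st.1 * 2 + 1

-- ===== PORT B =====
def number_of_unchanged_char_after_reverse_alt (s : String) : Int :=
  let n : Int := PySem.Str.len s
  (PySem.List.pyRange 0 n 1).foldl
    (fun acc i => if PySem.Str.pyGet? s i == PySem.Str.pyGet? s (n - 1 - i) then acc + 1 else acc) 0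

-- ===== PRECONDITION & SPEC =====
def Spec_number_of_unchanged_char_after_reverse (s : String) (out : Int) : Prop := out = number_of_unchanged_char_after_reverse_alt s
instance (s : String) (out : Int) : Decidable (Spec_number_of_unchanged_char_after_reverse s out) := by unfold Spec_number_of_unchanged_char_after_reverse; infer_instance

-- ===== CLAIM (what is proved, stated in full; the proofs are below) =====
def Claim_equal_number_of_unchanged_char_after_reverse : Prop := ∀ (s : String), Dom_number_of_unchanged_char_after_reverse s → Spec_number_of_unchanged_char_after_reverse s (number_of_unchanged_char_after_reverse s)

-- ===== LEMMAS AND PROOFS =====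

-- the mirror predicate at Nat index k, for a string of length N
def pvP (s : String) (N k : ℕ) : Bool :=
  PySem.Str.pyGet? s (k : Int) == PySem.Str.pyGet? s ((N : Int) - 1 - k)

-- the partial count as an Int-valued sum
def pvS (s : String) (N m : ℕ) : Int :=
  ∑ k ∈ Finset.range m, (if pvP s N k then 1 else 0)

theorem pvS_succ (s : String) (N m : ℕ) :
    pvS s N (m + 1) = pvS s N m + (if pvP s N m then 1 else 0) := by
  unfold pvS
  exact Finset.sum_range_succ _ _

theorem pvBeqComm {α : Type} [BEq α] [LawfulBEq α] (a b : α) : (a == b) = (b == a) := by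
  by_cases h : a = b
  · subst h; rfl
  · rw [beq_eq_false_iff_ne.mpr h, beq_eq_false_iff_ne.mpr (Ne.symm h)]

-- symmetry: pvP s N k = pvP s N (N-1-k) for k < N
theorem pvP_symm (s : String) (N k : ℕ) (hN : N = s.toList.length) (hk : k < N) :
    pvP s N (N - 1 - k) = pvP s N k := by
  unfold pvP
  have h1 : ((N - 1 - k : ℕ) : Int) = (N : Int) - 1 - k := by omega
  have h2 : (N : Int) - 1 - ((N - 1 - k : ℕ) : Int) = (k : Int) := by omega
  rw [h1]
  have h2' : (N : Int) - 1 - ((N : Int) - 1 - k) = (k : Int) := by ring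
  rw [h2']
  exact pvBeqComm ..

-- middle element matches itself when N is odd
theorem pvP_mid (s : String) (N : ℕ) (hN : N = s.toList.length) (h2 : N % 2 = 1) :
    pvP s N (N / 2) = true := by
  unfold pvP
  have h : (N : Int) - 1 - ((N / 2 : ℕ) : Int) = ((N / 2 : ℕ) : Int) := by omega
  rw [h]
  exact beq_self_eq_true _

-- main counting identity
theorem pvS_split (s : String) (N : ℕ) (hN : N = s.toList.length) :
    pvS s N N = 2 * pvS s N (N / 2) + (if N % 2 = 0 then 0 else 1) := by
  have hM : N = N / 2 + (N - N / 2) := by omega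
  -- split the sum at N/2
  have hsplit : pvS s N N = pvS s N (N / 2)
      + ∑ i ∈ Finset.range (N - N / 2), (if pvP s N (N / 2 + i) then (1:Int) else 0) := by
    unfold pvS
    calc ∑ k ∈ Finset.range N, (if pvP s N k then (1:Int) else 0)
        = ∑ k ∈ Finset.range (N / 2 + (N - N / 2)), (if pvP s N k then (1:Int) else 0) := by
          rw [← hM]
      _ = _ := Finset.sum_range_add (fun k => if pvP s N k then (1:Int) else 0) (N / 2) (N - N / 2)
  -- reflect the upper sum
  have hrefl : ∑ i ∈ Finset.range (N - N / 2), (if pvP s N (N / 2 + i) then (1:Int) else 0)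
      = ∑ i ∈ Finset.range (N - N / 2), (if pvP s N i then (1:Int) else 0) := by
    have base := Finset.sum_range_reflect (fun i => if pvP s N i then (1:Int) else 0) (N - N / 2)
    rw [← base]
    apply Finset.sum_congr rfl
    intro i hi
    have hi' : i < N - N / 2 := Finset.mem_range.mp hi
    have h1 : N - N / 2 - 1 - i = N - 1 - (N / 2 + i) := by omega
    rw [h1, pvP_symm s N (N / 2 + i) hN (by omega)]
  have hupper : ∑ i ∈ Finset.range (N - N / 2), (if pvP s N i then (1:Int) else 0)
      = pvS s N (N / 2) + (if N % 2 = 0 then 0 else 1) := by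
    by_cases hp : N % 2 = 0
    · have he : N - N / 2 = N / 2 := by omega
      rw [he, if_pos hp]
      simp [pvS]
    · have ho : N - N / 2 = N / 2 + 1 := by omega
      rw [ho, show (∑ i ∈ Finset.range (N/2+1), (if pvP s N i then (1:Int) else 0)) = pvS s N (N/2+1) from rfl,
        pvS_succ, pvP_mid s N hN (by omega), if_neg hp]
      simp
  rw [hsplit, hrefl, hupper]; ring

-- B's fold computes pvS
theorem b_fold (s : String) (N : ℕ) (hN : N = s.toList.length) (m : ℕ) (hm : m ≤ N) (init : Int) :
    ((PySem.List.pyRange 0 (m : Int) 1).foldl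
      (fun acc i => if PySem.Str.pyGet? s i == PySem.Str.pyGet? s ((N : Int) - 1 - i) then acc + 1 else acc) init)
    = init + pvS s N m := by
  induction m with
  | zero => simp [pvS]
  | succ m ih =>
    have h : ((m : Int) + 1) = ((m + 1 : ℕ) : Int) := by push_cast; ring
    rw [show ((m + 1 : ℕ) : Int) = (m : Int) + 1 from by push_cast; ring,
      PySem.List.pyRange_one_succ_right (by positivity), List.foldl_append,
      ih (by omega), pvS_succ]
    simp only [List.foldl_cons, List.foldl_nil, pvP]
    split <;> ring

-- A's fold: state invariant (res, j) with j = n-1-i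
theorem a_fold (s : String) (N : ℕ) (hN : N = s.toList.length) (m : ℕ) (hm : m ≤ N) :
    ((PySem.List.pyRange 0 (m : Int) 1).foldl
      (fun (st : Int × Int) i =>
        ((if PySem.Str.pyGet? s i == PySem.Str.pyGet? s st.2 then st.1 + 1 else st.1), st.2 - 1))
      (0, (N : Int) - 1))
    = (pvS s N m, (N : Int) - 1 - m) := by
  induction m with
  | zero => simp [pvS]
  | succ m ih =>
    rw [show ((m + 1 : ℕ) : Int) = (m : Int) + 1 from by push_cast; ring,
      PySem.List.pyRange_one_succ_right (by positivity), List.foldl_append,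
      ih (by omega), pvS_succ]
    simp only [List.foldl_cons, List.foldl_nil, pvP, Prod.mk.injEq]
    constructor
    · split <;> ring
    · ring

theorem alt_eq_pvS (s : String) :
    number_of_unchanged_char_after_reverse_alt s = pvS s s.toList.length s.toList.length := by
  unfold number_of_unchanged_char_after_reverse_alt
  have hl : PySem.Str.len s = (s.toList.length : Int) := PySem.Str.len_eq s
  simp only [hl]
  rw [b_fold s s.toList.length rfl s.toList.length le_rfl 0]
  ring

-- ===== VERDICT (by name: the statement is the Claim_ definition above) =====
theorem number_of_unchanged_char_after_reverse_spec : Claim_equal_number_of_unchanged_char_after_reverse := by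
  intro s _
  unfold Spec_number_of_unchanged_char_after_reverse
  rw [alt_eq_pvS]
  set N := s.toList.length with hN
  unfold number_of_unchanged_char_after_reverse
  have hl : PySem.Str.len s = (N : Int) := PySem.Str.len_eq s
  simp only [hl]
  by_cases h0 : (N : Int) = 0
  · have : N = 0 := by omega
    simp [this, pvS]
  by_cases h1 : (N : Int) = 1
  · have hN1 : N = 1 := by omega
    rw [if_neg h0, if_pos h1]
    have hp1 : pvP s 1 0 = true := by
      unfold pvP
      have h : ((1:ℕ) : Int) - 1 - ((0:ℕ) : Int) = ((0:ℕ) : Int) := by norm_num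
      rw [h]; exact beq_self_eq_true _
    have : pvS s N N = 1 := by
      rw [hN1, pvS_succ, hp1]
      simp [pvS]
    omega
  · rw [if_neg h0, if_neg h1]
    have hdiv : PySem.Int.floordiv (N : Int) 2 = ((N / 2 : ℕ) : Int) :=
      PySem.Int.floordiv_natCast N 2
    have hmod : PySem.Int.mod (N : Int) 2 = ((N % 2 : ℕ) : Int) :=
      PySem.Int.mod_natCast N 2
    rw [hdiv, hmod, a_fold s N rfl (N / 2) (by omega)]
    rw [pvS_split s N rfl]
    by_cases hpar : N % 2 = 0
    · simp [hpar]; ring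
    · have : ¬ ((N % 2 : ℕ) : Int) = 0 := by omega
      rw [if_neg this, if_neg (by omega : ¬ N % 2 = 0)]
      ring
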